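-- pv_equiv track=rewrite | github.com/artemis64/aoc | 2022/advent13a.py | findListEnd
-- ===== SOURCE A (Python) =====
-- def findListEnd(string):
-- 	brackets = 0
-- 	for index, i in enumerate(string):
-- 		if i == '[':
-- 			brackets +=1
-- 		elif i == ']':
-- 			brackets -=1
-- 		if brackets == 0:
-- 			return index
-- ===== SOURCE B (Python) =====
-- def findListEnd(string):
--     # Stateless brute force: for each index, recount the brackets in the whole
--     # prefix with str.count and compare the two totals; no running counter.
--     for index in range(len(string)):
--         prefix = string[:index + 1]
--         if prefix.count('[') == prefix.count(']'):
--             return index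
--     return None
-- ===== Notes on version B (the rewrite author's own statement) =====
-- stated objective: alternative
-- what changed: Replaces A's single streaming plus/minus-one counter with a stateless brute-force scan: for each index it recounts the opening and closing brackets in the whole prefix with str.count and returns the first index where the two totals agree; no carried state between iterations.
import Mathlib
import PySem

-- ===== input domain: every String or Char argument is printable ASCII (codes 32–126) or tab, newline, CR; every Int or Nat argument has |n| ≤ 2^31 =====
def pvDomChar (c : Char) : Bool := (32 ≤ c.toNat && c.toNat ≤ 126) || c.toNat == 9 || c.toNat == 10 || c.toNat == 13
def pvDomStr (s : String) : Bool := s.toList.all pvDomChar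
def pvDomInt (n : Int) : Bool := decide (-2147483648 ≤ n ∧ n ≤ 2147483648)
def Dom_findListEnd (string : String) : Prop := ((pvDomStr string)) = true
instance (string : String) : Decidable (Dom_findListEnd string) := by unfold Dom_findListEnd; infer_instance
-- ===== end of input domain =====

-- B replaces A's streaming counter by a stateless brute-force scan that recounts the opening and
-- closing brackets in each prefix with str.count and returns the first index where the totals agree.
-- ===== PORT A =====
def pvLoopA : List Char → Int → Int → Option Int
  | [], _, _ => none
  | c :: rest, index, brackets =>
    let brackets' := if c = '[' then brackets + 1 else if c = ']' then brackets - 1 else brackets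
    if brackets' = 0 then some index else pvLoopA rest (index + 1) brackets'

def findListEnd (string : String) : Option Int :=
  pvLoopA string.toList 0 0

-- ===== PORT B =====
def pvLoopB (s : String) : List Int → Option Int
  | [] => none
  | i :: rest =>
    let pfx := PySem.Str.slice s none (some (i + 1))
    if PySem.Str.count pfx "[" = PySem.Str.count pfx "]" then some i
    else pvLoopB s rest

def findListEnd_alt (string : String) : Option Int :=
  pvLoopB string (PySem.List.pyRange 0 (PySem.Str.len string) 1)

-- ===== PRECONDITION & SPEC =====
def Spec_findListEnd (string : String) (out : Option Int) : Prop := out = findListEnd_alt string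
instance (string : String) (out : Option Int) : Decidable (Spec_findListEnd string out) := by unfold Spec_findListEnd; infer_instance

-- ===== CLAIM (what is proved, stated in full; the proofs are below) =====
def Claim_equal_findListEnd : Prop := ∀ (string : String), Dom_findListEnd string → Spec_findListEnd string (findListEnd string)

-- ===== LEMMAS AND PROOFS =====

-- Python's substring count with a one-character needle is the character count (fuel form).
theorem count_go_singleton (c : Char) : ∀ (fuel : Nat) (l : List Char) (acc : Nat),
    l.length ≤ fuel → PySem.Chars.count.go [c] fuel l acc = acc + l.count c := by
  intro fuel
  induction fuel with
  | zero => intro l acc h; simp at h; simp [h, PySem.Chars.count.go]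
  | succ n ih =>
    intro l acc h
    cases l with
    | nil => simp [PySem.Chars.count.go]
    | cons x t =>
      rw [PySem.Chars.count.go]
      by_cases hx : c = x
      · subst hx
        simp [List.isPrefixOf, ih t (acc + 1) (by simpa using h)]
        omega
      · simp [List.isPrefixOf, hx, ih t acc (by simpa using h), Ne.symm hx]

theorem count_singleton (l : List Char) (c : Char) :
    PySem.Chars.count l [c] = l.count c := by
  rw [PySem.Chars.count]
  simp [count_go_singleton c l.length l 0 le_rfl]

-- balance of a prefix: the value A's running counter holds after consuming it
def pvBal (l : List Char) : Int := (l.count '[' : Int) - (l.count ']' : Int)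

-- B's scan from index pre.length onward agrees with A's loop on the remaining suffix.
theorem main_loop (s : String) : ∀ (cs pre : List Char), s.toList = pre ++ cs →
    pvLoopB s (PySem.List.pyRange (pre.length : Int) (PySem.Str.len s) 1)
      = pvLoopA cs (pre.length : Int) (pvBal pre) := by
  intro cs
  induction cs with
  | nil =>
    intro pre h
    have hl : PySem.Str.len s = (pre.length : Int) := by
      simp [PySem.Str.len_eq, h]
    rw [hl, PySem.List.pyRange_one_eq_nil le_rfl]
    rfl
  | cons c rest ih =>
    intro pre h
    have hl : PySem.Str.len s = ((pre.length + 1 + rest.length : Nat) : Int) := by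
      simp [PySem.Str.len_eq, h]; ring
    rw [hl, PySem.List.pyRange_one_cons (by push_cast; omega)]
    simp only [pvLoopB]
    have hpfx : (PySem.Str.slice s none (some ((pre.length : Int) + 1))).toList = pre ++ [c] := by
      have hc1 : (pre.length : Int) + 1 = ((pre.length + 1 : Nat) : Int) := by push_cast; ring
      rw [PySem.Str.toList_slice, PySem.Chars.slice_eq_listSlice, hc1,
        PySem.List.slice_to_natCast, h]
      simp [List.take_append]
    have hcond : (PySem.Str.count (PySem.Str.slice s none (some ((pre.length : Int) + 1))) "["
        = PySem.Str.count (PySem.Str.slice s none (some ((pre.length : Int) + 1))) "]")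
        ↔ ((pre ++ [c]).count '[' = (pre ++ [c]).count ']') := by
      rw [PySem.Str.count_eq, PySem.Str.count_eq, hpfx]
      rw [show "[".toList = ['['] from rfl, show "]".toList = [']'] from rfl,
        count_singleton, count_singleton]
    set b' := if c = '[' then pvBal pre + 1 else if c = ']' then pvBal pre - 1 else pvBal pre with hb'def
    have hb' : pvBal (pre ++ [c]) = b' := by
      simp only [pvBal, List.count_append, hb'def]
      by_cases h1 : c = '['
      · simp [h1]; ring
      · by_cases h2 : c = ']'
        · simp [h2]; ring
        · simp [h1, h2]
    have hzero : ((pre ++ [c]).count '[' = (pre ++ [c]).count ']') ↔ b' = 0 := by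
      rw [← hb']; unfold pvBal; omega
    simp only [pvLoopA]
    by_cases hc : (pre ++ [c]).count '[' = (pre ++ [c]).count ']'
    · rw [if_pos (hcond.mpr hc), if_pos (by rw [← hb'def]; exact hzero.mp hc)]
    · rw [if_neg (fun hh => hc (hcond.mp hh)),
        if_neg (by rw [← hb'def]; exact fun hh => hc (hzero.mpr hh))]
      have h' : s.toList = (pre ++ [c]) ++ rest := by simpa [List.append_assoc] using h
      have hrec := ih (pre ++ [c]) h'
      rw [hl] at hrec
      simpa [hb', List.length_append, Nat.cast_add] using hrec

-- ===== VERDICT (by name: the statement is the Claim_ definition above) =====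
theorem findListEnd_spec : Claim_equal_findListEnd := by
  intro s _
  unfold Spec_findListEnd findListEnd findListEnd_alt
  have h := main_loop s s.toList [] (by simp)
  simp only [List.length_nil, Nat.cast_zero] at h
  rw [h]
  rfl
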